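-- pv_equiv track=rewrite | github.com/anigmo97/4 | ALT/PRACTICA_3/langford.py | langford_directo
-- ===== SOURCE A (Python) =====
-- def langford_directo(N,allsolutions):
--     N2   = 2*N
--     seq  = [0]*N2
--
--     ###########################################################################################
--     ###########################################################################################
--     ###########################################################################################
--     #################################     INICIO CODIGO AÑADIDO   #############################
--     ###########################################################################################
--     ###########################################################################################
--     ###########################################################################################
--     def ramificar(num):
--         lista_indices = []
--         i=0
--         while (i+num+1) < N2: #PRUEBA INICIAL, SE PUEDE PONER IS_PROMISING DENTRO
--             lista_indices.append( (i,(i+num+1)) )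
--             i+=1
--         return lista_indices
--
--     def is_promising(tupla_indices):
--         return seq[tupla_indices[0]] == 0 and seq[tupla_indices[1]] == 0
--
--     ###########################################################################################
--     ###########################################################################################
--     ###########################################################################################
--     #################################        FIN CODIGO AÑADIDO   #############################
--     ###########################################################################################
--     ###########################################################################################
--     ###########################################################################################
--
--     def backtracking(num):
--         if num<=0:
--             yield "-".join(map(str, seq))
--         else:
--     ###########################################################################################
--     ###########################################################################################
--     ###########################################################################################
--     #################################     INICIO CODIGO AÑADIDO   #############################
--     ###########################################################################################
--     ###########################################################################################
--     ###########################################################################################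
--             for tupla_indices in ramificar(num):
--                 if is_promising(tupla_indices):
--                     seq[tupla_indices[0]] = num
--                     seq[tupla_indices[1]] = num
--                     for s in backtracking(num -1):
--                         yield s
--                     seq[tupla_indices[0]] = 0
--                     seq[tupla_indices[1]] = 0
--     ###########################################################################################
--     ###########################################################################################
--     ###########################################################################################
--     #################################        FIN CODIGO AÑADIDO   #############################
--     ###########################################################################################
--     ###########################################################################################
--     ###########################################################################################
--
--
--     if N%4 not in (0,3):
--         yield "no hay solucion"
--     else:
--         count = 0
--         for s in backtracking(N):
--             count += 1
--             yield "solution %04d -> %s" % (count,s)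
--             if not allsolutions:
--                 break
-- ===== SOURCE B (Python) =====
-- def langford_directo(N, allsolutions):
--     n2 = 2 * N
--
--     def place(seq, num, i):
--         placed = list(seq)
--         placed[i] = num
--         placed[i + num + 1] = num
--         return placed
--
--     def candidates(num, seq):
--         return [i for i in range(n2 - num - 1)
--                 if seq[i] == 0 and seq[i + num + 1] == 0]
--
--     def solutions(num, seq):
--         if num <= 0:
--             return [seq]
--         return [s for i in candidates(num, seq)
--                   for s in solutions(num - 1, place(seq, num, i))]
--
--     def first(num, seq):
--         if num <= 0:
--             return seq
--         for i in candidates(num, seq):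
--             r = first(num - 1, place(seq, num, i))
--             if r is not None:
--                 return r
--         return None
--
--     if N % 4 in (0, 3):
--         if allsolutions:
--             sols = solutions(N, [0] * n2)
--         else:
--             f = first(N, [0] * n2)
--             sols = [] if f is None else [f]
--         return ["solution %04d -> %s" % (k, "-".join(map(str, s)))
--                 for k, s in enumerate(sols, 1)]
--     return ["no hay solucion"]
-- ===== Notes on version B (the rewrite author's own statement) =====
-- stated objective: alternative
-- what changed: Replaces the lazy mutate-and-undo generator backtracking with pure recursion over immutable sequence copies: an enumerate-all solver (flatMap over a filtered candidate list) when all solutions are wanted, a find-first search returning an Optional sequence otherwise, with formatting and numbering done afterwards in one comprehension instead of a counting consumer loop with break.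
import Mathlib
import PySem

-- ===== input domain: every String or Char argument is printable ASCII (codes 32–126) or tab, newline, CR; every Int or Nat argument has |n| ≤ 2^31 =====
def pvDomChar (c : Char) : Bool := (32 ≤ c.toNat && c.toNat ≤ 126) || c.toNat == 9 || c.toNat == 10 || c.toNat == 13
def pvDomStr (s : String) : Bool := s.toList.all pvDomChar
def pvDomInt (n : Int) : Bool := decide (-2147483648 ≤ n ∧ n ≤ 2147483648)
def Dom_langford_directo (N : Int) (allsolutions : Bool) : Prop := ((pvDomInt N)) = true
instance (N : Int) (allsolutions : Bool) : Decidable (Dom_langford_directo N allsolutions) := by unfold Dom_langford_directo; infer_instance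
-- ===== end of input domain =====

-- B replaces the lazy mutate-and-undo generator with a pure recursive solver returning all
-- solution sequences, formatted/numbered/truncated afterwards (return value only; A is a generator).


-- shared formatting helpers: both Pythons contain the identical literal code
-- '"-".join(map(str, seq))' and '"solution %04d -> %s" % (count, s)'
def pvJoinSeq (seq : List Int) : String :=
  PySem.Str.join "-" (seq.map PySem.Int.toStr)

-- '%04d' for the (always positive) solution counter: zero-pad to width 4
def pvFmt (c : Int) (s : String) : String :=
  let t := PySem.Int.toStr c
  "solution " ++ String.ofList (List.replicate (4 - t.toList.length) '0') ++ t ++ " -> " ++ s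

-- ===== PORT A =====
-- 'ramificar': while (i+num+1) < N2: append (i, i+num+1); i += 1
def pvRamificar (N2 num i : Int) : List (Int × Int) :=
  if h : i + num + 1 < N2 then (i, i + num + 1) :: pvRamificar N2 num (i + 1) else []
termination_by (N2 - (i + num + 1)).toNat
decreasing_by omega

-- 'backtracking': seq is mutated then restored, so functionally the original seq flows on;
-- all indices touched are in range, so pyGetD's default and List.set clamping are never hit
def pvBacktrack (N2 num : Int) (seq : List Int) : List String :=
  if _h : num ≤ 0 then [pvJoinSeq seq]
  else
    (pvRamificar N2 num 0).foldl
      (fun acc t =>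
        if PySem.List.pyGetD seq t.1 0 == 0 && PySem.List.pyGetD seq t.2 0 == 0 then
          acc ++ pvBacktrack N2 (num - 1) ((seq.set t.1.toNat num).set t.2.toNat num)
        else acc)
      []
termination_by num.toNat
decreasing_by omega

-- consumer loop: count += 1; yield "solution %04d -> %s"; if not allsolutions: break
def pvConsume (all : Bool) (count : Int) : List String → List String
  | [] => []
  | s :: rest => pvFmt (count + 1) s :: (if all then pvConsume all (count + 1) rest else [])

def langford_directo (N : Int) (allsolutions : Bool) : List String :=
  let N2 := 2 * N
  let seq : List Int := List.replicate N2.toNat 0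
  if !(PySem.Int.mod N 4 == 0 || PySem.Int.mod N 4 == 3) then ["no hay solucion"]
  else pvConsume allsolutions 0 (pvBacktrack N2 N seq)

-- ===== PORT B =====
def pvPlace (seq : List Int) (num i : Int) : List Int :=
  (seq.set i.toNat num).set (i + num + 1).toNat num

def pvCandidates (n2 num : Int) (seq : List Int) : List Int :=
  (PySem.List.pyRange 0 (n2 - num - 1) 1).filter
    (fun i => PySem.List.pyGetD seq i 0 == 0 && PySem.List.pyGetD seq (i + num + 1) 0 == 0)

def pvSolutions (n2 num : Int) (seq : List Int) : List (List Int) :=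
  if _h : num ≤ 0 then [seq]
  else (pvCandidates n2 num seq).flatMap (fun i => pvSolutions n2 (num - 1) (pvPlace seq num i))
termination_by num.toNat
decreasing_by omega

-- 'first': return the first solution found, or None ('for i: r = first(...); if r is not None: return r')
def pvFirst (n2 num : Int) (seq : List Int) : Option (List Int) :=
  if _h : num ≤ 0 then some seq
  else (pvCandidates n2 num seq).findSome? (fun i => pvFirst n2 (num - 1) (pvPlace seq num i))
termination_by num.toNat
decreasing_by omega

def langford_directo_alt (N : Int) (allsolutions : Bool) : List String :=
  let n2 := 2 * N
  if PySem.Int.mod N 4 == 0 || PySem.Int.mod N 4 == 3 then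
    let sols :=
      if allsolutions then pvSolutions n2 N (List.replicate n2.toNat 0)
      else
        match pvFirst n2 N (List.replicate n2.toNat 0) with
        | none => []
        | some f => [f]
    (PySem.List.enumerate sols 1).map (fun p => pvFmt p.1 (pvJoinSeq p.2))
  else ["no hay solucion"]

-- ===== PRECONDITION & SPEC =====
def Spec_langford_directo (N : Int) (allsolutions : Bool) (out : List String) : Prop := out = langford_directo_alt N allsolutions
instance (N : Int) (allsolutions : Bool) (out : List String) : Decidable (Spec_langford_directo N allsolutions out) := by unfold Spec_langford_directo; infer_instance

-- ===== CLAIM (what is proved, stated in full; the proofs are below) =====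
def Claim_equal_langford_directo : Prop := ∀ (N : Int) (allsolutions : Bool), Dom_langford_directo N allsolutions → Spec_langford_directo N allsolutions (langford_directo N allsolutions)

-- ===== LEMMAS AND PROOFS =====

-- A's ramificar is the candidate range mapped to index pairs
theorem pvRamificar_eq (N2 num i : Int) :
    pvRamificar N2 num i
      = (PySem.List.pyRange i (N2 - num - 1) 1).map (fun k => (k, k + num + 1)) := by
  fun_induction pvRamificar with
  | case1 i h ih =>
    rw [PySem.List.pyRange_one_cons (by omega : i < N2 - num - 1)]
    simp [ih]
  | case2 i h =>
    rw [PySem.List.pyRange_one_eq_nil (by omega : N2 - num - 1 ≤ i)]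
    rfl

-- A's backtracking returns exactly B's solution sequences, joined
theorem pvBacktrack_eq (N2 : Int) (num : Int) (seq : List Int) :
    pvBacktrack N2 num seq = (pvSolutions N2 num seq).map pvJoinSeq := by
  fun_induction pvBacktrack with
  | case1 num seq h => rw [pvSolutions]; simp [h]
  | case2 num seq h ih =>
    rw [pvSolutions]; simp only [h, dite_false]; unfold pvCandidates
    rw [pvRamificar_eq, List.foldl_map, PySem.List.foldl_if_eq_foldl_filter,
       PySem.List.foldl_append_eq_flatMap]
    simp only [List.nil_append, List.map_flatMap, pvPlace]
    congr 1
    funext y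
    exact ih (y, y + num + 1)

theorem head?_flatMap {α β : Type} (l : List α) (g : α → List β) :
    (l.flatMap g).head? = l.findSome? (fun x => (g x).head?) := by
  induction l with
  | nil => rfl
  | cons a t ih =>
    cases hga : g a with
    | nil => simp [hga, ih]
    | cons b bs => simp [hga]

-- B's find-first search returns the head of B's full solution list
theorem pvFirst_eq (n2 num : Int) (seq : List Int) :
    pvFirst n2 num seq = (pvSolutions n2 num seq).head? := by
  fun_induction pvFirst with
  | case1 num seq h => rw [pvSolutions]; simp [h]
  | case2 num seq h ih =>
    rw [pvSolutions]; simp only [h, dite_false]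
    rw [head?_flatMap]
    congr 1
    funext i
    exact ih i

theorem enumerate_map {α β : Type} (f : α → β) (xs : List α) (s : Int) :
    PySem.List.enumerate (xs.map f) s
      = (PySem.List.enumerate xs s).map (fun p => (p.1, f p.2)) := by
  induction xs generalizing s with
  | nil => rfl
  | cons x t ih => simp [PySem.List.enumerate_cons, ih]

theorem pvConsume_true (xs : List String) (c : Int) :
    pvConsume true c xs
      = (PySem.List.enumerate xs (c + 1)).map (fun p => pvFmt p.1 p.2) := by
  induction xs generalizing c with
  | nil => rfl
  | cons x t ih => simp [pvConsume, PySem.List.enumerate_cons, ih]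

theorem pvConsume_false (xs : List String) (c : Int) :
    pvConsume false c xs = (xs.take 1).map (fun s => pvFmt (c + 1) s) := by
  cases xs <;> rfl

-- ===== VERDICT (by name: the statement is the Claim_ definition above) =====
theorem langford_directo_spec : Claim_equal_langford_directo := by
  intro N allsolutions _
  unfold Spec_langford_directo langford_directo langford_directo_alt
  dsimp only
  rw [pvBacktrack_eq]
  cases hc : (PySem.Int.mod N 4 == 0 || PySem.Int.mod N 4 == 3) with
  | false => simp
  | true =>
    simp only [Bool.not_true, Bool.false_eq_true, if_false, if_true]
    cases allsolutions with
    | true =>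
      rw [if_pos rfl, pvConsume_true, enumerate_map, List.map_map]
      rfl
    | false =>
      rw [if_neg (by simp), pvConsume_false, List.map_take, pvFirst_eq]
      cases pvSolutions (2 * N) N (List.replicate (2 * N).toNat 0) with
      | nil => rfl
      | cons a t => simp [PySem.List.enumerate_cons]
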